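-- pv_equiv track=rewrite | github.com/Pofilo/grammalecte | gc_lang/fr/dictionnaire/genfrdic.py | getVerbMultiMorph
-- ===== SOURCE A (Python) =====
-- def getVerbMultiMorph (s):
--     "renvoie la liste des morphologies fusionnées"
--     lTag = s.split()
--     lRes = []
--     for n, sTag in enumerate(lTag, 1):
--         if not sTag[0].isdigit():
--             sMorph = sTag
--             for sTag2 in lTag[n:]:
--                 if sTag2[0].isdigit():
--                     lRes.append(sMorph + " " + sTag2)
--         else:
--             break
--     return lRes
-- ===== SOURCE B (Python) =====
-- def getVerbMultiMorph(s):
--     "renvoie la liste des morphologies fusionnées"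
--     lTag = s.split()
--     prefix = []
--     for t in lTag:
--         if t[0].isdigit():
--             break
--         prefix.append(t)
--     digits = [t for t in lTag if t[0].isdigit()]
--     return [p + " " + d for p in prefix for d in digits]
-- ===== Notes on version B (the rewrite author's own statement) =====
-- stated objective: simpler
-- what changed: Replaces A's interleaved outer loop-with-break that rescans each tail by two independent passes -- the leading non-digit run and the digit-initial tags filtered once -- followed by a plain Cartesian-product comprehension (e.g. on 'v1 v2 1sg 2sg'), correct because every digit-initial tag lies after the whole non-digit prefix run.
import Mathlib
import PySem

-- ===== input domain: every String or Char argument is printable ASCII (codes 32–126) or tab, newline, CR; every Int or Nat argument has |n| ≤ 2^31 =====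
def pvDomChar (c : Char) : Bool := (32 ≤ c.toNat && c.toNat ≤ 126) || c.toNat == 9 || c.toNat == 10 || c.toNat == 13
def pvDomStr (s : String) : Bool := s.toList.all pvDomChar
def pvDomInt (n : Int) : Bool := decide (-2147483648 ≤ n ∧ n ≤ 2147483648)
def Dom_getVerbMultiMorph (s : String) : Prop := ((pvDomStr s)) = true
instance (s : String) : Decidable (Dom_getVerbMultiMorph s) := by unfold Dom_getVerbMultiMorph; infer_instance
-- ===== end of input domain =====

-- B replaces A's interleaved loop-with-break and per-tag tail rescan by two independent
-- passes (leading non-digit run; digit tags filtered once) and a product comprehension (simpler).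

-- sTag[0].isdigit() — split() tokens are never empty, so the [] case is unreachable
def pvDigit0 (t : String) : Bool :=
  match t.toList with
  | [] => false
  | c :: _ => PySem.Chars.isdigit c

-- ===== PORT A =====
-- the 'for n, sTag in enumerate(lTag, 1)' loop with break; the inner 'for sTag2 in lTag[n:]' is the foldl over ts
def pvGoA : List String → List String → List String
  | [], acc => acc
  | t :: ts, acc =>
    if !pvDigit0 t then
      pvGoA ts (ts.foldl (fun a t2 => if pvDigit0 t2 then a ++ [t ++ " " ++ t2] else a) acc)
    else acc

def getVerbMultiMorph (s : String) : List String :=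
  pvGoA (PySem.Str.split₀ s) []

-- ===== PORT B =====
-- B's prefix loop with break
def pvPrefixB : List String → List String
  | [] => []
  | t :: ts => if pvDigit0 t then [] else t :: pvPrefixB ts

def getVerbMultiMorph_alt (s : String) : List String :=
  let lTag := PySem.Str.split₀ s
  let pre := pvPrefixB lTag
  let digits := lTag.filter pvDigit0
  pre.flatMap (fun p => digits.map (fun d => p ++ " " ++ d))

-- ===== PRECONDITION & SPEC =====
def Spec_getVerbMultiMorph (s : String) (out : List String) : Prop := out = getVerbMultiMorph_alt s
instance (s : String) (out : List String) : Decidable (Spec_getVerbMultiMorph s out) := by unfold Spec_getVerbMultiMorph; infer_instance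

-- ===== CLAIM (what is proved, stated in full; the proofs are below) =====
def Claim_equal_getVerbMultiMorph : Prop := ∀ (s : String), Dom_getVerbMultiMorph s → Spec_getVerbMultiMorph s (getVerbMultiMorph s)

-- ===== LEMMAS AND PROOFS =====
theorem pvGoA_eq (L acc : List String) :
    pvGoA L acc =
      acc ++ (pvPrefixB L).flatMap (fun p => (L.filter pvDigit0).map (fun d => p ++ " " ++ d)) := by
  induction L generalizing acc with
  | nil => simp [pvGoA, pvPrefixB]
  | cons t ts ih =>
    by_cases h : pvDigit0 t
    · simp [pvGoA, pvPrefixB, h]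
    · simp [pvGoA, pvPrefixB, h, ih, PySem.List.foldl_append_if]

-- ===== VERDICT (by name: the statement is the Claim_ definition above) =====
theorem getVerbMultiMorph_spec : Claim_equal_getVerbMultiMorph := by
  intro s _
  unfold Spec_getVerbMultiMorph getVerbMultiMorph getVerbMultiMorph_alt
  simp [pvGoA_eq]
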